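-- pv_equiv track=rewrite | github.com/20130353/Leetcode | target_offer/公司套题/WY/篮球队问题.py | solution
-- ===== SOURCE A (Python) =====
-- def solution(arr, n):
--     arr.sort(reverse=True)
--     tsum = sum(arr)
--     dp = [1] + [0] * tsum
--     ans = 0
--     for i in range(n):
--         for j in range(tsum, arr[i] - 1, -1):
--             dp[j] += dp[j - arr[i]]
--             # 为什么这里只计算放入A的情况，不计算不放入A队的情况呢？
--             if j > tsum - j and j - arr[i] < tsum - j + arr[i]:
--                 ans += dp[j - arr[i]]
--     return ans
-- ===== SOURCE B (Python) =====
-- def solution(arr, n):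
--     arr.sort(reverse=True)
--     tsum = sum(arr)
--     memo = {}
--
--     def cnt(i, s):
--         # number of subsets of arr[:i] with sum exactly s (top-down, memoized)
--         if s < 0 or s > tsum:
--             return 0
--         if i == 0:
--             return 1 if s == 0 else 0
--         if (i, s) not in memo:
--             memo[(i, s)] = cnt(i - 1, s) + cnt(i - 1, s - arr[i - 1])
--         return memo[(i, s)]
--
--     ans = 0
--     for i in range(n):
--         a = arr[i]
--         for s in range(tsum - a + 1):
--             if 2 * s < tsum < 2 * (s + a):
--                 ans += cnt(i, s)
--     return ans
-- ===== Notes on version B (the rewrite author's own statement) =====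
-- stated objective: alternative
-- what changed: B replaces A's bottom-up in-place rolling knapsack array (with the answer accumulated inside the descending update loop) by a top-down memoized recursion cnt(i,s) for the number of subsets of the first i items with sum s, computed on demand from a separate counting double loop; A's dp array, its in-place descending update and its fused ans update disappear.
-- outside the precondition, e.g. on solution([-1], 1): A returns 0, B returns 0; on solution([-1, -3], 1): A returns 0, B returns 0
import Mathlib
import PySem

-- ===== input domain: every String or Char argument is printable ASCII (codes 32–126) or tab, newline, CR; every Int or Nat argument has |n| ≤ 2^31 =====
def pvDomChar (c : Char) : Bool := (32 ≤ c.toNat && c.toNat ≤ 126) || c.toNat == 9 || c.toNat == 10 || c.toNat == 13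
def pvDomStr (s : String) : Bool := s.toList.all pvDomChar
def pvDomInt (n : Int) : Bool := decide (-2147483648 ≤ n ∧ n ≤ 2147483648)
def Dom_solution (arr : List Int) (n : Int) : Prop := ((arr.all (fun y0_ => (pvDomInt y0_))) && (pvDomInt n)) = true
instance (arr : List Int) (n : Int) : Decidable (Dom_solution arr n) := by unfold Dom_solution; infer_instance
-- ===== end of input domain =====

-- B replaces A's bottom-up in-place rolling knapsack array (answer fused into the descending
-- update loop) by a top-down memoized recursion cnt(i, s) queried from a separate counting
-- double loop (objective: alternative). Both Pythons sort arr in place; the equivalence proved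
-- here is about the RETURN value only (the in-place sort is the same in A and B).

-- ===== PORT A =====
-- inner loop body: dp[j] += dp[j - a]; then 'if j > tsum - j and j - arr[i] < tsum - j + arr[i]:
-- ans += dp[j - arr[i]]' — the ans-read happens AFTER the write to dp[j], as in Python.
def solutionInner (a tsum : Int) (st : List Int × Int) (j : Int) : List Int × Int :=
  let dp' := PySem.List.pySetD st.1 j (PySem.List.pyGetD st.1 j 0 + PySem.List.pyGetD st.1 (j - a) 0)
  let ans' := if j > tsum - j ∧ j - a < tsum - j + a then st.2 + PySem.List.pyGetD dp' (j - a) 0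
              else st.2
  (dp', ans')

-- indices into dp are ported with pyGetD/pySetD (total forms): Pre_solution keeps every index in
-- range, where they are exact; outside Pre_ the Python raises IndexError.
def solution (arr : List Int) (n : Int) : Int :=
  let arrS := PySem.List.sorted arr (fun x => x) true
  let tsum := arrS.sum
  let dp0 : List Int := [1] ++ PySem.List.pyRepeat [0] tsum
  ((PySem.List.pyRange 0 n 1).foldl
      (fun st i =>
        (PySem.List.pyRange tsum (PySem.List.pyGetD arrS i 0 - 1) (-1)).foldl
          (solutionInner (PySem.List.pyGetD arrS i 0) tsum) st)
      (dp0, 0)).2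

-- ===== PORT B =====
-- cnt(i, s) with its memo dict threaded through (the Python memo is a closed-over dict; the
-- recursion's first argument is the int i, always ≥ 0 at every call site — the loop below calls
-- cnt(i, s) with i from range(n) — so it is carried as the Nat it denotes; 'memo[(i,s)] = …;
-- return memo[(i,s)]' is ported as returning the just-inserted value).
def cntB (L : List Int) (t : Int) : Nat → Int → PySem.Dict (Nat × Int) Int → Int × PySem.Dict (Nat × Int) Int
  | 0, s, memo =>
    if s < 0 ∨ s > t then (0, memo)
    else ((if s = 0 then 1 else 0), memo)
  | i' + 1, s, memo =>
    if s < 0 ∨ s > t then (0, memo)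
    else
      match memo.get? (i' + 1, s) with
      | some v => (v, memo)
      | none =>
        let r1 := cntB L t i' s memo
        let r2 := cntB L t i' (s - PySem.List.pyGetD L (i' : Int) 0) r1.2
        (r1.1 + r2.1, r2.2.insert (i' + 1, s) (r1.1 + r2.1))

def solution_alt (arr : List Int) (n : Int) : Int :=
  let arrS := PySem.List.sorted arr (fun x => x) true
  let tsum := arrS.sum
  ((PySem.List.pyRange 0 n 1).foldl
    (fun (st : Int × PySem.Dict (Nat × Int) Int) i =>
      (PySem.List.pyRange 0 (tsum - PySem.List.pyGetD arrS i 0 + 1) 1).foldl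
        (fun st2 s =>
          if 2 * s < tsum ∧ tsum < 2 * (s + PySem.List.pyGetD arrS i 0) then
            let r := cntB arrS tsum i.toNat s st2.2
            (st2.1 + r.1, r.2)
          else st2)
        st)
    (0, PySem.Dict.empty)).1

-- ===== PRECONDITION & SPEC =====
-- Pre_ is the problem's natural domain: n ≤ len(arr) and at most len(arr) - n negative
-- skills, so the n processed (largest) entries are all nonnegative — with a negative entry
-- among the processed ones A raises IndexError (dp index beyond the array) whenever the
-- inner range is nonempty; on a few degenerate inputs with more negatives A happens to
-- return 0 (every inner range is empty), which B returns there too (see cites).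
def Pre_solution (arr : List Int) (n : Int) : Prop :=
  n ≤ (arr.length : Int) ∧
  ((arr.countP (fun x => decide (x < 0)) : Nat) : Int) ≤ (arr.length : Int) - n
instance (arr : List Int) (n : Int) : Decidable (Pre_solution arr n) := by
  unfold Pre_solution; infer_instance

def pvWitness_solution : List Int × Int := ([1, 2, 3, 4, 5], 5)

def Spec_solution (arr : List Int) (n : Int) (out : Int) : Prop := out = solution_alt arr n
instance (arr : List Int) (n : Int) (out : Int) : Decidable (Spec_solution arr n out) := by
  unfold Spec_solution; infer_instance

-- ===== CLAIM (what is proved, stated in full; the proofs are below) =====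
def Claim_equal_solution : Prop := ∀ (arr : List Int) (n : Int), Dom_solution arr n →
  Pre_solution arr n → Spec_solution arr n (solution arr n)

-- ===== LEMMAS AND PROOFS =====

-- the mathematical value cnt computes: number of subsets of the first i items with sum s
def cPure (L : List Int) (t : Int) : Nat → Int → Int
  | 0, s => if s < 0 ∨ s > t then 0 else if s = 0 then 1 else 0
  | i' + 1, s =>
    if s < 0 ∨ s > t then 0
    else cPure L t i' s + cPure L t i' (s - PySem.List.pyGetD L (i' : Int) 0)

-- every memo entry is the pure value
def MemoInv (L : List Int) (t : Int) (memo : PySem.Dict (Nat × Int) Int) : Prop :=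
  ∀ p v, memo.get? p = some v → v = cPure L t p.1 p.2

lemma cntB_spec (L : List Int) (t : Int) :
    ∀ (i : Nat) (s : Int) (memo : PySem.Dict (Nat × Int) Int), MemoInv L t memo →
      (cntB L t i s memo).1 = cPure L t i s ∧ MemoInv L t (cntB L t i s memo).2 := by
  intro i
  induction i with
  | zero =>
    intro s memo hinv
    by_cases hs : s < 0 ∨ s > t <;> simp [cntB, cPure, hs, hinv]
  | succ i ih =>
    intro s memo hinv
    by_cases hs : s < 0 ∨ s > t
    · simp [cntB, cPure, hs, hinv]
    · simp only [cntB, if_neg hs]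
      cases hmo : memo.get? (i + 1, s) with
      | some v =>
        exact ⟨hinv (i + 1, s) v hmo, hinv⟩
      | none =>
        obtain ⟨h11, h12⟩ := ih s memo hinv
        obtain ⟨h21, h22⟩ := ih (s - PySem.List.pyGetD L (i : Int) 0) _ h12
        refine ⟨?_, ?_⟩
        · show (cntB L t i s memo).1
              + (cntB L t i (s - PySem.List.pyGetD L (i : Int) 0) (cntB L t i s memo).2).1
              = cPure L t (i + 1) s
          simp only [cPure, if_neg hs]
          rw [h11, h21]
        · show MemoInv L t
            ((cntB L t i (s - PySem.List.pyGetD L (i : Int) 0) (cntB L t i s memo).2).2.insert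
              (i + 1, s)
              ((cntB L t i s memo).1
                + (cntB L t i (s - PySem.List.pyGetD L (i : Int) 0) (cntB L t i s memo).2).1))
          intro p v hp
          rw [PySem.Dict.get?_insert] at hp
          by_cases hpk : p = (i + 1, s)
          · rw [if_pos hpk] at hp
            cases hp
            rw [hpk]
            simp only [cPure, if_neg hs]
            rw [h11, h21]
          · rw [if_neg hpk] at hp
            exact h22 p v hp

lemma cPure_out (L : List Int) (t : Int) (i : Nat) (s : Int) (hs : s < 0 ∨ s > t) :
    cPure L t i s = 0 := by
  cases i <;> simp [cPure, hs]

-- the recurrence in the guarded-index form that A's dp update realises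
lemma cPure_succ (L : List Int) (t : Int) (i : Nat) (m : Int) (hm : 0 ≤ m) (hmt : m ≤ t) :
    cPure L t (i + 1) m
      = cPure L t i m
        + if PySem.List.pyGetD L (i : Int) 0 ≤ m
          then cPure L t i (m - PySem.List.pyGetD L (i : Int) 0) else 0 := by
  have hs : ¬ (m < 0 ∨ m > t) := by omega
  simp only [cPure, if_neg hs]
  by_cases hc : PySem.List.pyGetD L (i : Int) 0 ≤ m
  · rw [if_pos hc]
  · rw [if_neg hc,
        cPure_out L t i (m - PySem.List.pyGetD L (i : Int) 0) (Or.inl (by omega)), add_zero]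

-- the entry of the initial dp row [1] + [0]*t
lemma pyGetD_first (t m : Int) (hm : 0 ≤ m) (hmt : m ≤ t) :
    PySem.List.pyGetD ([1] ++ PySem.List.pyRepeat [0] t) m 0 = if m = 0 then (1 : Int) else 0 := by
  rcases Int.eq_ofNat_of_zero_le hm with ⟨k, hk⟩
  subst hk
  rw [PySem.List.pyGetD_natCast,
      if_congr (by omega : ((k : Int) = 0) ↔ (k = 0)) rfl rfl]
  cases k with
  | zero => simp
  | succ k =>
    rw [if_neg (by omega)]
    simp only [List.cons_append, List.nil_append, List.getD_cons_succ,
      PySem.List.pyRepeat_singleton]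
    rcases Nat.lt_or_ge k t.toNat with h | h
    · rw [List.getD_eq_getElem _ _ (by simpa using h)]
      simp
    · rw [List.getD_eq_default _ _ (by simpa using h)]

lemma pyGetD_set_int (dp : List Int) (k m v : Int) (hk : 0 ≤ k) (hm : 0 ≤ m)
    (hmlen : m < (dp.length : Int)) :
    PySem.List.pyGetD (dp.set k.toNat v) m 0 = if m = k then v else PySem.List.pyGetD dp m 0 := by
  rw [PySem.List.pyGetD_eq_getElem _ _ hm (by simp; omega),
      PySem.List.pyGetD_eq_getElem _ _ hm hmlen]
  rw [List.getElem_set]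
  split <;> split <;> first | rfl | omega

lemma innerLoop (a t : Int) (ha : 0 ≤ a) :
  ∀ (c : Nat) (k : Int) (dp : List Int) (ans : Int),
    k = a - 1 + (c : Int) → k < (dp.length : Int) →
    ∃ dp',
      (PySem.List.pyRange k (a - 1) (-1)).foldl (solutionInner a t) (dp, ans)
        = (dp', ans + ((PySem.List.pyRange a (k + 1) 1).map
            (fun j => if j > t - j ∧ j - a < t - j + a
                      then PySem.List.pyGetD dp (j - a) 0 else 0)).sum)
      ∧ dp'.length = dp.length
      ∧ ∀ m : Int, 0 ≤ m → m < (dp.length : Int) →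
          PySem.List.pyGetD dp' m 0
            = if a ≤ m ∧ m ≤ k
              then PySem.List.pyGetD dp m 0 + PySem.List.pyGetD dp (m - a) 0
              else PySem.List.pyGetD dp m 0 := by
  intro c
  induction c with
  | zero =>
    intro k dp ans hk hlen
    refine ⟨dp, ?_, rfl, ?_⟩
    · rw [PySem.List.pyRange_neg_one_eq_nil (by omega), show k + 1 = a from by omega,
          PySem.List.pyRange_one_eq_nil (le_refl a)]
      simp
    · intro m hm hmlen; rw [if_neg (by omega)]
  | succ c ih =>
    intro k dp ans hk hlen
    have hak : a ≤ k := by omega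
    have hk0 : 0 ≤ k := by omega
    set v := PySem.List.pyGetD dp k 0 + PySem.List.pyGetD dp (k - a) 0 with hv
    set dp1 := dp.set k.toNat v with hdp1
    have hlen1 : dp1.length = dp.length := by simp [hdp1]
    have hget1 : ∀ m : Int, 0 ≤ m → m < (dp.length : Int) →
        PySem.List.pyGetD dp1 m 0 = if m = k then v else PySem.List.pyGetD dp m 0 := by
      intro m hm hmlen; exact pyGetD_set_int dp k m v hk0 hm hmlen
    set ans1 := ans + (if k > t - k ∧ k - a < t - k + a then PySem.List.pyGetD dp (k - a) 0 else 0)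
      with hans1
    have hstep : solutionInner a t (dp, ans) k = (dp1, ans1) := by
      simp only [solutionInner]
      rw [PySem.List.pySetD_of_nonneg _ _ hk0, ← hv, ← hdp1, hans1]
      simp only [Prod.mk.injEq, true_and]
      by_cases hc : k > t - k ∧ k - a < t - k + a
      · have hapos : 0 < a := by omega
        rw [if_pos hc, if_pos hc, hget1 (k - a) (by omega) (by omega),
            if_neg (show ¬(k - a = k) by omega)]
      · rw [if_neg hc, if_neg hc, add_zero]
    rw [PySem.List.pyRange_neg_one_cons (by omega), List.foldl_cons, hstep]
    obtain ⟨dp', h1, h2, h3⟩ := ih (k - 1) dp1 ans1 (by omega) (by rw [hlen1]; omega)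
    rw [show k - 1 + 1 = k from by ring] at h1
    refine ⟨dp', ?_, by rw [h2, hlen1], ?_⟩
    · have hcong : (PySem.List.pyRange a k 1).map
            (fun j => if j > t - j ∧ j - a < t - j + a
                      then PySem.List.pyGetD dp1 (j - a) 0 else 0)
          = (PySem.List.pyRange a k 1).map
            (fun j => if j > t - j ∧ j - a < t - j + a
                      then PySem.List.pyGetD dp (j - a) 0 else 0) := by
        apply List.map_congr_left
        intro j hj
        rw [PySem.List.mem_pyRange_one] at hj
        rw [hget1 (j - a) (by omega) (by omega),
            if_neg (show ¬(j - a = k) by omega)]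
      rw [h1, hcong, PySem.List.pyRange_one_succ_right hak, List.map_append, List.sum_append]
      simp only [Prod.mk.injEq, List.map_cons, List.map_nil, List.sum_cons, List.sum_nil,
        true_and]
      rw [hans1]; ring
    · intro m hm hmlen
      have h3' := h3 m hm (by rw [hlen1]; exact hmlen)
      by_cases hmk : m = k
      · subst hmk
        rw [if_neg (by omega)] at h3'
        rw [h3', hget1 m hm hmlen, if_pos rfl, if_pos ⟨hak, le_refl _⟩]
      · rw [h3']
        by_cases hcase : a ≤ m ∧ m ≤ k - 1
        · rw [if_pos hcase, hget1 m hm hmlen, if_neg hmk,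
              hget1 (m - a) (by omega) (by omega),
              if_neg (show ¬(m - a = k) by omega), if_pos (by omega)]
        · rw [if_neg hcase, hget1 m hm hmlen, if_neg hmk, if_neg (by omega)]

-- the per-item contribution, in B's (s-indexed, f-valued) form
def contrib (t a : Int) (f : Int → Int) : Int :=
  ((PySem.List.pyRange 0 (t - a + 1) 1).map
    (fun s => if 2 * s < t ∧ t < 2 * (s + a) then f s else 0)).sum

-- A's j-indexed window is B's s-indexed window under s = j - a
lemma countReindex (t a : Int) (f : Int → Int) :
    ((PySem.List.pyRange a (t + 1) 1).map
      (fun j => if j > t - j ∧ j - a < t - j + a then f (j - a) else 0)).sum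
      = contrib t a f := by
  unfold contrib
  rw [PySem.List.pyRange_one a (t + 1), PySem.List.pyRange_one 0 (t - a + 1),
      show (t + 1 - a).toNat = (t - a + 1 - 0).toNat from by omega,
      List.map_map, List.map_map]
  congr 1
  apply List.map_congr_left
  intro k _
  simp only [Function.comp_apply]
  rw [show a + (k : Int) - a = 0 + (k : Int) from by ring]
  refine if_congr (by omega) rfl rfl

-- A's outer loop: dp stays pointwise equal to cPure's current row, ans is the sum of contribs
lemma outerA (L : List Int) (t : Int) (h0t : 0 ≤ t)
    (N : Nat) (hNlen : N ≤ L.length)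
    (hposn : ∀ j : Nat, j < N → (hj : j < L.length) → 0 ≤ L[j]) :
    ∀ i : Nat, i ≤ N →
    ∃ dp,
      (PySem.List.pyRange 0 (i : Int) 1).foldl
        (fun st j => (PySem.List.pyRange t (PySem.List.pyGetD L j 0 - 1) (-1)).foldl
            (solutionInner (PySem.List.pyGetD L j 0) t) st)
        (([1] ++ PySem.List.pyRepeat [0] t : List Int), 0)
      = (dp, ((PySem.List.pyRange 0 (i : Int) 1).map
           (fun j => contrib t (PySem.List.pyGetD L j 0) (cPure L t j.toNat))).sum)
      ∧ dp.length = t.toNat + 1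
      ∧ ∀ m : Int, 0 ≤ m → m < ((t.toNat : Int) + 1) →
          PySem.List.pyGetD dp m 0 = cPure L t i m := by
  intro i
  induction i with
  | zero =>
    intro _
    refine ⟨[1] ++ PySem.List.pyRepeat [0] t, ?_, ?_, ?_⟩
    · rw [show ((0 : Nat) : Int) = 0 from rfl, PySem.List.pyRange_one_eq_nil (le_refl 0)]
      simp
    · simp [PySem.List.pyRepeat_singleton]
    · intro m hm hmt
      rw [pyGetD_first t m hm (by omega)]
      simp only [cPure]
      rw [if_neg (by omega : ¬ (m < 0 ∨ m > t))]
  | succ i ih =>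
    intro hi1
    have hilen : i < L.length := by omega
    obtain ⟨dp, hfold, hdlen, hptw⟩ := ih (by omega)
    have hgi : PySem.List.pyGetD L (i : Int) 0 = L[i] := by
      rw [PySem.List.pyGetD_natCast, List.getD_eq_getElem L 0 hilen]
    have ha : 0 ≤ L[i] := hposn i (by omega) hilen
    by_cases hat : L[i] ≤ t
    · -- the processed value fits under the total: the inner loop really runs
      obtain ⟨dp', hfold', hdlen', hptw'⟩ :=
        innerLoop L[i] t ha (t - L[i] + 1).toNat t dp
          (((PySem.List.pyRange 0 (i : Int) 1).map
             (fun j => contrib t (PySem.List.pyGetD L j 0) (cPure L t j.toNat))).sum)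
          (by omega) (by rw [hdlen]; omega)
      refine ⟨dp', ?_, by rw [hdlen', hdlen], ?_⟩
      · rw [show ((i + 1 : Nat) : Int) = (i : Int) + 1 from by push_cast; ring,
            PySem.List.pyRange_one_succ_right (by positivity), List.foldl_append,
            List.foldl_cons, List.foldl_nil, hfold, hgi, hfold']
        have hcong : (PySem.List.pyRange L[i] (t + 1) 1).map
              (fun j => if j > t - j ∧ j - L[i] < t - j + L[i]
                        then PySem.List.pyGetD dp (j - L[i]) 0 else 0)
            = (PySem.List.pyRange L[i] (t + 1) 1).map
              (fun j => if j > t - j ∧ j - L[i] < t - j + L[i]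
                        then cPure L t i (j - L[i]) else 0) := by
          apply List.map_congr_left
          intro j hj
          rw [PySem.List.mem_pyRange_one] at hj
          rw [hptw (j - L[i]) (by omega) (by omega)]
        rw [hcong, countReindex, List.map_append, List.sum_append]
        simp only [Prod.mk.injEq, List.map_cons, List.map_nil, List.sum_cons, List.sum_nil,
          add_zero, true_and, hgi]
        rw [show ((i : Int)).toNat = i from by omega]
      · intro m hm hmt
        have hmlen : m < (dp.length : Int) := by rw [hdlen]; omega
        rw [hptw' m hm hmlen,
            cPure_succ L t i m hm (by omega), hgi]
        by_cases hc : L[i] ≤ m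
        · rw [if_pos ⟨hc, by omega⟩, if_pos hc,
              hptw m hm (by omega), hptw (m - L[i]) (by omega) (by omega)]
        · rw [if_neg (by omega), if_neg hc, add_zero, hptw m hm (by omega)]
    · -- the processed value exceeds the total (a trailing negative makes t small):
      -- the inner range and the contrib range are both empty
      refine ⟨dp, ?_, hdlen, ?_⟩
      · rw [show ((i + 1 : Nat) : Int) = (i : Int) + 1 from by push_cast; ring,
            PySem.List.pyRange_one_succ_right (by positivity), List.foldl_append,
            List.foldl_cons, List.foldl_nil, hfold, hgi,
            PySem.List.pyRange_neg_one_eq_nil (by omega), List.foldl_nil,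
            List.map_append, List.sum_append]
        simp only [Prod.mk.injEq, List.map_cons, List.map_nil, List.sum_cons, List.sum_nil,
          add_zero, true_and, hgi]
        rw [show ((i : Int)).toNat = i from by omega]
        have : contrib t L[i] (cPure L t i) = 0 := by
          unfold contrib
          rw [PySem.List.pyRange_one_eq_nil (by omega)]
          simp
        rw [this, add_zero]
      · intro m hm hmt
        rw [hptw m hm hmt,
            cPure_succ L t i m hm (by omega), hgi,
            if_neg (by omega), add_zero]

-- B's inner counting loop accumulates contrib and preserves the memo invariant
lemma innerB (L : List Int) (t : Int) (i : Nat) (a : Int) :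
    ∀ (l : List Int) (st : Int × PySem.Dict (Nat × Int) Int), MemoInv L t st.2 →
      (l.foldl
          (fun st2 s =>
            if 2 * s < t ∧ t < 2 * (s + a) then
              let r := cntB L t i s st2.2
              (st2.1 + r.1, r.2)
            else st2) st).1
        = st.1 + (l.map (fun s => if 2 * s < t ∧ t < 2 * (s + a) then cPure L t i s else 0)).sum
      ∧ MemoInv L t (l.foldl
          (fun st2 s =>
            if 2 * s < t ∧ t < 2 * (s + a) then
              let r := cntB L t i s st2.2
              (st2.1 + r.1, r.2)
            else st2) st).2 := by
  intro l
  induction l with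
  | nil => intro st hinv; exact ⟨by simp, hinv⟩
  | cons x xs ih =>
    intro st hinv
    simp only [List.foldl_cons, List.map_cons, List.sum_cons]
    by_cases hc : 2 * x < t ∧ t < 2 * (x + a)
    · obtain ⟨hv, hinv'⟩ := cntB_spec L t i x st.2 hinv
      obtain ⟨h1, h2⟩ := ih (st.1 + (cntB L t i x st.2).1, (cntB L t i x st.2).2) hinv'
      rw [if_pos hc, if_pos hc]
      refine ⟨?_, h2⟩
      rw [h1]
      simp only [hv]
      ring
    · rw [if_neg hc, if_neg hc]
      obtain ⟨h1, h2⟩ := ih st hinv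
      exact ⟨by rw [h1, zero_add], h2⟩

-- B's outer loop is the sum of contribs
lemma outerB (L : List Int) (t : Int) :
    ∀ (l : List Int) (st : Int × PySem.Dict (Nat × Int) Int), MemoInv L t st.2 →
      (l.foldl
        (fun (st : Int × PySem.Dict (Nat × Int) Int) i =>
          (PySem.List.pyRange 0 (t - PySem.List.pyGetD L i 0 + 1) 1).foldl
            (fun st2 s =>
              if 2 * s < t ∧ t < 2 * (s + PySem.List.pyGetD L i 0) then
                let r := cntB L t i.toNat s st2.2
                (st2.1 + r.1, r.2)
              else st2)
            st) st).1
      = st.1 + (l.map (fun i => contrib t (PySem.List.pyGetD L i 0) (cPure L t i.toNat))).sum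
      ∧ MemoInv L t (l.foldl
        (fun (st : Int × PySem.Dict (Nat × Int) Int) i =>
          (PySem.List.pyRange 0 (t - PySem.List.pyGetD L i 0 + 1) 1).foldl
            (fun st2 s =>
              if 2 * s < t ∧ t < 2 * (s + PySem.List.pyGetD L i 0) then
                let r := cntB L t i.toNat s st2.2
                (st2.1 + r.1, r.2)
              else st2)
            st) st).2 := by
  intro l
  induction l with
  | nil => intro st hinv; exact ⟨by simp, hinv⟩
  | cons x xs ih =>
    intro st hinv
    simp only [List.foldl_cons, List.map_cons, List.sum_cons]
    obtain ⟨h1, h2⟩ := innerB L t x.toNat (PySem.List.pyGetD L x 0)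
      (PySem.List.pyRange 0 (t - PySem.List.pyGetD L x 0 + 1) 1) st hinv
    obtain ⟨h3, h4⟩ := ih _ h2
    refine ⟨?_, h4⟩
    rw [h3, h1]
    unfold contrib
    ring

-- ===== VERDICT (by name: the statement is the Claim_ definition above) =====
theorem solution_spec : Claim_equal_solution := by
  intro arr n _ hpre
  obtain ⟨hnlen, hcnt⟩ := hpre
  unfold Spec_solution
  simp only [solution, solution_alt]
  set L := PySem.List.sorted arr (fun x => x) true with hL
  have hperm : L.Perm arr := PySem.List.sorted_perm arr (fun x => x) true
  have hlen : L.length = arr.length := hperm.length_eq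
  set t := L.sum with htdef
  by_cases hn : n ≤ 0
  · rw [PySem.List.pyRange_one_eq_nil hn]
    simp
  · have hn : 0 < n := by omega
    set N := n.toNat with hN
    have hNL : N ≤ L.length := by omega
    have hcastN : ((N : Nat) : Int) = n := by omega
    -- the n processed (= n largest) entries are nonnegative: more than
    -- len - n negatives would contradict Pre_'s count bound
    have hcntL : L.countP (fun x => decide (x < 0)) = arr.countP (fun x => decide (x < 0)) :=
      hperm.countP_eq _
    have hmono : ∀ p q : Nat, (hpq : p ≤ q) → (hq : q < L.length) →
        L[q] ≤ L[p]'(Nat.lt_of_le_of_lt hpq hq) := by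
      have hpw := PySem.List.sorted_pairwise_rev arr (fun x => x)
      rw [← hL, List.pairwise_iff_getElem] at hpw
      intro p q hpq hq
      rcases Nat.lt_or_ge p q with h | h
      · exact hpw p q (by omega) hq h
      · have : p = q := by omega
        subst this; exact le_refl _
    have hposn : ∀ j : Nat, j < N → (hj : j < L.length) → 0 ≤ L[j] := by
      intro j hjN hj
      by_contra hneg
      have hjneg : L[j] < 0 := by omega
      have hall : ∀ x ∈ L.drop j, (fun x => decide (x < 0)) x = true := by
        intro x hx
        obtain ⟨k, hk, hkx⟩ := List.mem_iff_getElem.mp hx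
        rw [List.getElem_drop] at hkx
        have hklen : j + k < L.length := by
          have hk' := hk
          rw [List.length_drop] at hk'
          omega
        have hle := hmono j (j + k) (by omega) hklen
        simp only [decide_eq_true_eq]
        omega
      have hdropcnt : (L.drop j).countP (fun x => decide (x < 0)) = (L.drop j).length :=
        List.countP_eq_length.mpr hall
      have hsplit : (L.take j ++ L.drop j).countP (fun x => decide (x < 0))
          = (L.take j).countP (fun x => decide (x < 0))
            + (L.drop j).countP (fun x => decide (x < 0)) := List.countP_append
      rw [List.take_append_drop] at hsplit
      have hdl : (L.drop j).length = L.length - j := List.length_drop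
      omega
    obtain ⟨hBval, -⟩ := outerB L t (PySem.List.pyRange 0 n 1) (0, PySem.Dict.empty)
      (by intro p v hp; rw [PySem.Dict.get?_empty] at hp; cases hp)
    rw [hBval, zero_add]
    by_cases ht0 : t < 0
    · -- negative total: every inner range of A and every contrib range of B is empty
      have hbody : ∀ (st : List Int × Int), ∀ j ∈ PySem.List.pyRange 0 n 1,
          (PySem.List.pyRange t (PySem.List.pyGetD L j 0 - 1) (-1)).foldl
            (solutionInner (PySem.List.pyGetD L j 0) t) st = st := by
        intro st j hj
        rw [PySem.List.mem_pyRange_one] at hj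
        have hjN : j.toNat < N := by omega
        have haj : 0 ≤ PySem.List.pyGetD L j 0 := by
          rw [show j = ((j.toNat : Nat) : Int) from by omega, PySem.List.pyGetD_natCast,
              List.getD_eq_getElem L 0 (by omega)]
          exact hposn j.toNat hjN (by omega)
        rw [PySem.List.pyRange_neg_one_eq_nil (by omega), List.foldl_nil]
      have hA := PySem.List.foldl_congr_mem
        (l := PySem.List.pyRange 0 n 1)
        (init := (([1] ++ PySem.List.pyRepeat [0] t : List Int), (0 : Int)))
        (f := fun st i => (PySem.List.pyRange t (PySem.List.pyGetD L i 0 - 1) (-1)).foldl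
            (solutionInner (PySem.List.pyGetD L i 0) t) st)
        (g := fun st _ => st) (fun st j hj => hbody st j hj)
      rw [hA, PySem.List.foldl_ignore]
      have hzero : (PySem.List.pyRange 0 n 1).map
            (fun i => contrib t (PySem.List.pyGetD L i 0) (cPure L t i.toNat))
          = (PySem.List.pyRange 0 n 1).map (fun _ => (0 : Int)) := by
        apply List.map_congr_left
        intro i hi
        rw [PySem.List.mem_pyRange_one] at hi
        have haj : 0 ≤ PySem.List.pyGetD L i 0 := by
          rw [show i = ((i.toNat : Nat) : Int) from by omega, PySem.List.pyGetD_natCast,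
              List.getD_eq_getElem L 0 (by omega)]
          exact hposn i.toNat (by omega) (by omega)
        unfold contrib
        rw [PySem.List.pyRange_one_eq_nil (by omega)]
        simp
      rw [hzero]
      simp
    · have h0t : 0 ≤ t := by omega
      obtain ⟨dp, hfold, -, -⟩ := outerA L t h0t N hNL hposn N (le_refl N)
      rw [hcastN] at hfold
      rw [hfold]
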